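-- pv_equiv track=rewrite | github.com/priyansh1811/growgrid | growgrid_core/agents/economist_calculations.py | _season_start_delay_months
-- ===== SOURCE A (Python) =====
-- _SEASON_START_MONTH: dict[str, int] = {
--     "ZAID": 3,
--     "KHARIF": 6,
--     "RABI": 11,
-- }
--
-- def _season_start_delay_months(
--     planning_month: int | None,
--     seasons_supported: str | None,
-- ) -> int:
--     if not planning_month or not seasons_supported or not (seasons_supported or "").strip():
--         return 0
--
--     supported = {season.strip().upper() for season in (seasons_supported or "").split(",") if season.strip()}
--     if not supported or supported.intersection({"ALL", "BOTH", "PERENNIAL"}):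
--         return 0
--
--     current = "KHARIF" if planning_month in (6, 7, 8, 9, 10) else "RABI"
--     if current in supported or ("ZAID" in supported and planning_month in (3, 4, 5)):
--         return 0
--
--     delays = []
--     for season in supported:
--         start_month = _SEASON_START_MONTH.get(season)
--         if start_month is None:
--             continue
--         delay = (start_month - planning_month) % 12
--         delays.append(delay if delay > 0 else 12)
--     return min(delays) if delays else 0
-- ===== SOURCE B (Python) =====
-- # Forward scan: instead of collecting a set and minimising modular distances, parse the
-- # tokens once into per-season flags, then walk month by month until a supported season starts.
-- _SEASON_BY_START_MONTH = {3: "ZAID", 6: "KHARIF", 11: "RABI"}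
--
--
-- def _season_start_delay_months(planning_month, seasons_supported):
--     if not planning_month or not seasons_supported or not seasons_supported.strip():
--         return 0
--     any_token = special = zaid = kharif = rabi = False
--     for raw in seasons_supported.split(","):
--         token = raw.strip().upper()
--         if not token:
--             continue
--         any_token = True
--         if token in ("ALL", "BOTH", "PERENNIAL"):
--             special = True
--         elif token == "ZAID":
--             zaid = True
--         elif token == "KHARIF":
--             kharif = True
--         elif token == "RABI":
--             rabi = True
--     if not any_token or special:
--         return 0
--     if (kharif if 6 <= planning_month <= 10 else rabi) or (zaid and 3 <= planning_month <= 5):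
--         return 0
--     supported = {"ZAID": zaid, "KHARIF": kharif, "RABI": rabi}
--     for delay in range(1, 13):
--         month = (planning_month + delay - 1) % 12 + 1
--         season = _SEASON_BY_START_MONTH.get(month)
--         if season is not None and supported[season]:
--             return delay
--     return 0
-- ===== Notes on version B (the rewrite author's own statement) =====
-- stated objective: alternative
-- what changed: B never builds the supported set nor a per-season delay list: it folds the tokens once into five boolean flags (any/special/zaid/kharif/rabi) and then, instead of computing modular distances and taking their min, walks forward month by month (delay 1..12) returning the first month that is the start month of a flagged season.
import Mathlib
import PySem

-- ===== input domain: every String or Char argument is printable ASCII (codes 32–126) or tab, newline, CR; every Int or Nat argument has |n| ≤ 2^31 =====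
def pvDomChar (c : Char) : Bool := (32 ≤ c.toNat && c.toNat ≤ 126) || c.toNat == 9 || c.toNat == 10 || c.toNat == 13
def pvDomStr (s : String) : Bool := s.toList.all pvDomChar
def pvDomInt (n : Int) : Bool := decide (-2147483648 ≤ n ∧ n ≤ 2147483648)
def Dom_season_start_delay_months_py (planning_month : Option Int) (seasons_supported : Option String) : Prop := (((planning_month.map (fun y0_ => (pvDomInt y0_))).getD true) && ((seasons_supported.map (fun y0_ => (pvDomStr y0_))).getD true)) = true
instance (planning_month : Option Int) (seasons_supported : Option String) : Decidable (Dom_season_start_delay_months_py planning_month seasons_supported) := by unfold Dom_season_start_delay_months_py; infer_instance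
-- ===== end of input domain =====

-- B replaces A's supported set plus min-of-modular-distances with one token fold into five
-- boolean flags and a forward month-by-month scan for the first flagged start month (objective: alternative).
-- ===== PORT A =====
def pvStartMonth : PySem.Dict String Int :=
  ((PySem.Dict.empty.insert "ZAID" 3).insert "KHARIF" 6).insert "RABI" 11

def pvSupported (ss : String) : PySem.Set String :=
  PySem.Set.ofList ((((PySem.Str.split? ss ",").getD []).filter
    (fun t => PySem.Str.strip t != "")).map (fun t => PySem.Str.upper (PySem.Str.strip t)))

def season_start_delay_months_py (planning_month : Option Int) (seasons_supported : Option String) : Int :=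
  let pmFalsy := match planning_month with | none => true | some n => n == 0
  let ssFalsy := match seasons_supported with | none => true | some s => s == ""
  if pmFalsy || ssFalsy || (PySem.Str.strip (seasons_supported.getD "") == "") then 0
  else
    let pm := planning_month.getD 0
    let supported := pvSupported (seasons_supported.getD "")
    if supported.isEmpty || !(PySem.Set.inter supported ["ALL", "BOTH", "PERENNIAL"]).isEmpty then 0
    else
      let current := if pm == 6 || pm == 7 || pm == 8 || pm == 9 || pm == 10 then "KHARIF" else "RABI"
      if PySem.Set.contains supported current ||
          (PySem.Set.contains supported "ZAID" && (pm == 3 || pm == 4 || pm == 5)) then 0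
      else
        let delays := supported.foldl (fun acc season =>
          match pvStartMonth.get? season with
          | none => acc
          | some start_month =>
            let delay := PySem.Int.mod (start_month - pm) 12
            acc ++ [if delay > 0 then delay else 12]) []
        match PySem.List.min? delays (fun x => x) with
        | some m => m
        | none => 0

-- ===== PORT B =====
-- one step of B's token loop over state (any_token, special, zaid, kharif, rabi)
def pvFlagStep (st : Bool × Bool × Bool × Bool × Bool) (raw : String) : Bool × Bool × Bool × Bool × Bool :=
  let t := PySem.Str.upper (PySem.Str.strip raw)
  if t == "" then st
  else
    if t == "ALL" || t == "BOTH" || t == "PERENNIAL" then (true, true, st.2.2.1, st.2.2.2.1, st.2.2.2.2)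
    else if t == "ZAID" then (true, st.2.1, true, st.2.2.2.1, st.2.2.2.2)
    else if t == "KHARIF" then (true, st.2.1, st.2.2.1, true, st.2.2.2.2)
    else if t == "RABI" then (true, st.2.1, st.2.2.1, st.2.2.2.1, true)
    else (true, st.2.1, st.2.2.1, st.2.2.2.1, st.2.2.2.2)

def pvSeasonByStart : PySem.Dict Int String :=
  ((PySem.Dict.empty.insert 3 "ZAID").insert 6 "KHARIF").insert 11 "RABI"

def season_start_delay_months_py_alt (planning_month : Option Int) (seasons_supported : Option String) : Int :=
  let pmFalsy := match planning_month with | none => true | some n => n == 0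
  let ssFalsy := match seasons_supported with | none => true | some s => s == ""
  if pmFalsy || ssFalsy || (PySem.Str.strip (seasons_supported.getD "") == "") then 0
  else
    let pm := planning_month.getD 0
    let st := (((PySem.Str.split? (seasons_supported.getD "") ",").getD []).foldl pvFlagStep
      (false, false, false, false, false))
    if !st.1 || st.2.1 then 0
    else if (if 6 ≤ pm && pm ≤ 10 then st.2.2.2.1 else st.2.2.2.2) ||
        (st.2.2.1 && (3 ≤ pm && pm ≤ 5)) then 0
    else
      let supported : PySem.Dict String Bool :=
        ((PySem.Dict.empty.insert "ZAID" st.2.2.1).insert "KHARIF" st.2.2.2.1).insert "RABI" st.2.2.2.2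
      match (PySem.List.pyRange 1 13 1).find? (fun d =>
        match pvSeasonByStart.get? (PySem.Int.mod (pm + d - 1) 12 + 1) with
        | none => false
        | some season => supported.getD season false) with
      | some d => d
      | none => 0

-- ===== PRECONDITION & SPEC =====
def Spec_season_start_delay_months_py (planning_month : Option Int) (seasons_supported : Option String) (out : Int) : Prop := out = season_start_delay_months_py_alt planning_month seasons_supported
instance (planning_month : Option Int) (seasons_supported : Option String) (out : Int) : Decidable (Spec_season_start_delay_months_py planning_month seasons_supported out) := by unfold Spec_season_start_delay_months_py; infer_instance

-- ===== CLAIM (what is proved, stated in full; the proofs are below) =====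
def Claim_equal_season_start_delay_months_py : Prop := ∀ (planning_month : Option Int) (seasons_supported : Option String), Dom_season_start_delay_months_py planning_month seasons_supported → Spec_season_start_delay_months_py planning_month seasons_supported (season_start_delay_months_py planning_month seasons_supported)

-- ===== LEMMAS AND PROOFS =====

-- A's processed token list (before set dedup): stripped-uppercased nonempty tokens
def pvL (toks : List String) : List String :=
  (toks.filter (fun t => PySem.Str.strip t != "")).map (fun t => PySem.Str.upper (PySem.Str.strip t))

def pvIsSpecial (t : String) : Bool := t == "ALL" || t == "BOTH" || t == "PERENNIAL"

-- start delays of the three seasons as seen from month pm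
def pvDz (pm : Int) : Int := PySem.Int.mod (3 - pm - 1) 12 + 1
def pvDk (pm : Int) : Int := PySem.Int.mod (6 - pm - 1) 12 + 1
def pvDr (pm : Int) : Int := PySem.Int.mod (11 - pm - 1) 12 + 1

-- which delay values are produced by A's loop / hit by B's scan
def pvMS (pm : Int) (L : List String) (x : Int) : Prop :=
  (L.contains "ZAID" = true ∧ x = pvDz pm) ∨ (L.contains "KHARIF" = true ∧ x = pvDk pm) ∨
  (L.contains "RABI" = true ∧ x = pvDr pm)

-- A's delays list after reshaping the fold (delays_eq below)
def pvDelays (pm : Int) (L : List String) : List Int :=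
  (((PySem.Set.ofList L).filter (fun s => pvStartMonth.contains s)).map
    (fun s => PySem.Int.mod (pvStartMonth.getD s 0 - pm - 1) 12 + 1))

-- B's scan predicate
def pvQ (pm : Int) (L : List String) (d : Int) : Bool :=
  match pvSeasonByStart.get? (PySem.Int.mod (pm + d - 1) 12 + 1) with
  | none => false
  | some season =>
    (((PySem.Dict.empty.insert "ZAID" (L.contains "ZAID")).insert "KHARIF"
        (L.contains "KHARIF")).insert "RABI" (L.contains "RABI")).getD season false

theorem upper_empty_iff (s : String) : (PySem.Str.upper s = "") ↔ s = "" := by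
  constructor
  · intro h
    have h2 := congrArg String.toList h
    simpa [PySem.Str.toList_upper, PySem.Chars.upper] using h2
  · intro h; subst h; rfl

theorem flags_fold (toks : List String) (st : Bool × Bool × Bool × Bool × Bool) :
    toks.foldl pvFlagStep st =
      (st.1 || !(pvL toks).isEmpty,
       st.2.1 || (pvL toks).any pvIsSpecial,
       st.2.2.1 || (pvL toks).contains "ZAID",
       st.2.2.2.1 || (pvL toks).contains "KHARIF",
       st.2.2.2.2 || (pvL toks).contains "RABI") := by
  induction toks generalizing st with
  | nil => simp [pvL]
  | cons raw tl ih =>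
    rw [List.foldl_cons, ih]
    by_cases he : PySem.Str.strip raw = ""
    · have hstep : pvFlagStep st raw = st := by
        unfold pvFlagStep
        rw [he]
        rfl
      have hL : pvL (raw :: tl) = pvL tl := by
        simp [pvL, List.filter_cons, he]
      rw [hstep, hL]
    · have ht : PySem.Str.upper (PySem.Str.strip raw) ≠ "" :=
        fun h => he ((upper_empty_iff _).mp h)
      have hL : pvL (raw :: tl) = PySem.Str.upper (PySem.Str.strip raw) :: pvL tl := by
        simp [pvL, List.filter_cons, he]
      rw [hL]
      rcases st with ⟨a, sp, z, k, r⟩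
      simp only [pvFlagStep]
      rw [if_neg (by simpa using ht)]
      by_cases hs : (PySem.Str.upper (PySem.Str.strip raw) == "ALL" ||
          PySem.Str.upper (PySem.Str.strip raw) == "BOTH" ||
          PySem.Str.upper (PySem.Str.strip raw) == "PERENNIAL") = true
      · rw [if_pos hs]
        rcases Bool.or_eq_true_iff.mp hs with hs' | hs'
        · rcases Bool.or_eq_true_iff.mp hs' with hs'' | hs'' <;>
            rw [eq_of_beq hs''] <;> simp [pvIsSpecial]
        · rw [eq_of_beq hs']; simp [pvIsSpecial]
      · rw [if_neg hs]
        have hsp : pvIsSpecial (PySem.Str.upper (PySem.Str.strip raw)) = false := by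
          simpa [pvIsSpecial] using hs
        by_cases hZ : PySem.Str.upper (PySem.Str.strip raw) = "ZAID"
        · rw [hZ]; simp [pvIsSpecial]
        · rw [if_neg (by simpa using hZ)]
          by_cases hK : PySem.Str.upper (PySem.Str.strip raw) = "KHARIF"
          · rw [hK]; simp [pvIsSpecial]
          · rw [if_neg (by simpa using hK)]
            by_cases hR : PySem.Str.upper (PySem.Str.strip raw) = "RABI"
            · rw [hR]; simp [pvIsSpecial]
            · rw [if_neg (by simpa using hR)]
              have b1 : (PySem.Str.upper (PySem.Str.strip raw) == "ALL") = false := by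
                simp [pvIsSpecial] at hsp; simp [hsp.1.1]
              have b2 : (PySem.Str.upper (PySem.Str.strip raw) == "BOTH") = false := by
                simp [pvIsSpecial] at hsp; simp [hsp.1.2]
              have b3 : (PySem.Str.upper (PySem.Str.strip raw) == "PERENNIAL") = false := by
                simp [pvIsSpecial] at hsp; simp [hsp.2]
              have b4 : ("ZAID" == PySem.Str.upper (PySem.Str.strip raw)) = false := by
                simp [Ne.symm hZ]
              have b5 : ("KHARIF" == PySem.Str.upper (PySem.Str.strip raw)) = false := by
                simp [Ne.symm hK]
              have b6 : ("RABI" == PySem.Str.upper (PySem.Str.strip raw)) = false := by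
                simp [Ne.symm hR]
              simp [pvIsSpecial, b1, b2, b3, b4, b5, b6, Ne.symm hZ, Ne.symm hK, Ne.symm hR]

-- A's fold over the set, reshaped into a filter+map over its element list
theorem delays_eq (pm : Int) (acc : List Int) (sup : List String) :
    sup.foldl (fun acc season =>
      match pvStartMonth.get? season with
      | none => acc
      | some start_month =>
        let delay := PySem.Int.mod (start_month - pm) 12
        acc ++ [if delay > 0 then delay else 12]) acc
    = acc ++ (sup.filter (fun s => pvStartMonth.contains s)).map
        (fun s => PySem.Int.mod (pvStartMonth.getD s 0 - pm - 1) 12 + 1) := by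
  induction sup generalizing acc with
  | nil => simp
  | cons s t ih =>
    by_cases h1 : s = "ZAID"
    · subst h1
      simp only [List.foldl_cons, List.filter_cons]
      rw [show pvStartMonth.get? "ZAID" = some 3 by rfl]
      rw [show pvStartMonth.contains "ZAID" = true by rfl]
      simp only [if_true]
      rw [ih]
      simp [show pvStartMonth.getD "ZAID" 0 = 3 from rfl]
      split_ifs <;> omega
    · by_cases h2 : s = "KHARIF"
      · subst h2
        simp only [List.foldl_cons, List.filter_cons]
        rw [show pvStartMonth.get? "KHARIF" = some 6 by rfl]
        rw [show pvStartMonth.contains "KHARIF" = true by rfl]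
        simp only [if_true]
        rw [ih]
        simp [show pvStartMonth.getD "KHARIF" 0 = 6 from rfl]
        split_ifs <;> omega
      · by_cases h3 : s = "RABI"
        · subst h3
          simp only [List.foldl_cons, List.filter_cons]
          rw [show pvStartMonth.get? "RABI" = some 11 by rfl]
          rw [show pvStartMonth.contains "RABI" = true by rfl]
          simp only [if_true]
          rw [ih]
          simp [show pvStartMonth.getD "RABI" 0 = 11 from rfl]
          split_ifs <;> omega
        · have hg : pvStartMonth.get? s = none := by
            simp [pvStartMonth, PySem.Dict.get?, PySem.Dict.insert, PySem.Dict.empty]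
            exact ⟨fun h => h1 h.symm, fun h => h2 h.symm, fun h => h3 h.symm⟩
          have hc : pvStartMonth.contains s = false := by
            rw [PySem.Dict.contains_eq_isSome_get?, hg]; rfl
          simp only [List.foldl_cons, List.filter_cons, hc, hg, Bool.false_eq_true, if_false]
          exact ih acc

theorem mem_delays (pm : Int) (L : List String) (x : Int) :
    x ∈ pvDelays pm L ↔ pvMS pm L x := by
  unfold pvDelays pvMS
  simp only [List.mem_map, List.mem_filter]
  constructor
  · rintro ⟨s, ⟨hs, hc⟩, rfl⟩
    have hs' : s ∈ L := (PySem.Set.mem_ofList _ _).mp hs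
    have h3 : s = "ZAID" ∨ s = "KHARIF" ∨ s = "RABI" := by
      by_contra hcon
      push_neg at hcon
      have : pvStartMonth.get? s = none := by
        simp [pvStartMonth, PySem.Dict.get?, PySem.Dict.insert, PySem.Dict.empty]
        exact ⟨fun h => hcon.1 h.symm, fun h => hcon.2.1 h.symm, fun h => hcon.2.2 h.symm⟩
      rw [PySem.Dict.contains_eq_isSome_get?, this] at hc
      simp at hc
    rcases h3 with rfl | rfl | rfl
    · exact Or.inl ⟨List.elem_eq_true_of_mem hs', rfl⟩
    · exact Or.inr (Or.inl ⟨List.elem_eq_true_of_mem hs', rfl⟩)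
    · exact Or.inr (Or.inr ⟨List.elem_eq_true_of_mem hs', rfl⟩)
  · rintro (⟨hc, rfl⟩ | ⟨hc, rfl⟩ | ⟨hc, rfl⟩)
    · exact ⟨"ZAID", ⟨(PySem.Set.mem_ofList _ _).mpr (List.mem_of_elem_eq_true hc), by rfl⟩, rfl⟩
    · exact ⟨"KHARIF", ⟨(PySem.Set.mem_ofList _ _).mpr (List.mem_of_elem_eq_true hc), by rfl⟩, rfl⟩
    · exact ⟨"RABI", ⟨(PySem.Set.mem_ofList _ _).mpr (List.mem_of_elem_eq_true hc), by rfl⟩, rfl⟩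

theorem delay_bounds (a pm : Int) :
    1 ≤ PySem.Int.mod (a - pm - 1) 12 + 1 ∧ PySem.Int.mod (a - pm - 1) 12 + 1 ≤ 12 := by
  have h1 := PySem.Int.mod_nonneg (a - pm - 1) (b := 12) (by norm_num)
  have h2 := PySem.Int.mod_lt (a - pm - 1) (b := 12) (by norm_num)
  omega

theorem ms_bounds (pm : Int) (L : List String) (x : Int) (h : pvMS pm L x) :
    1 ≤ x ∧ x ≤ 12 := by
  rcases h with ⟨_, rfl⟩ | ⟨_, rfl⟩ | ⟨_, rfl⟩ <;>
    exact delay_bounds _ pm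

theorem q_iff (pm : Int) (L : List String) (d : Int) (hd1 : 1 ≤ d) (hd2 : d ≤ 12) :
    pvQ pm L d = true ↔ pvMS pm L d := by
  have e3 : (PySem.Int.mod (pm + d - 1) 12 + 1 = 3) ↔ d = pvDz pm := by
    unfold pvDz
    rw [PySem.Int.mod_eq_emod_of_pos (a := pm + d - 1) (by norm_num),
        PySem.Int.mod_eq_emod_of_pos (a := 3 - pm - 1) (by norm_num)]
    omega
  have e6 : (PySem.Int.mod (pm + d - 1) 12 + 1 = 6) ↔ d = pvDk pm := by
    unfold pvDk
    rw [PySem.Int.mod_eq_emod_of_pos (a := pm + d - 1) (by norm_num),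
        PySem.Int.mod_eq_emod_of_pos (a := 6 - pm - 1) (by norm_num)]
    omega
  have e11 : (PySem.Int.mod (pm + d - 1) 12 + 1 = 11) ↔ d = pvDr pm := by
    unfold pvDr
    rw [PySem.Int.mod_eq_emod_of_pos (a := pm + d - 1) (by norm_num),
        PySem.Int.mod_eq_emod_of_pos (a := 11 - pm - 1) (by norm_num)]
    omega
  unfold pvQ pvSeasonByStart pvMS
  rw [PySem.Dict.get?_insert, PySem.Dict.get?_insert, PySem.Dict.get?_insert]
  split_ifs with h11 h6 h3
  · simp only [PySem.Dict.getD_insert]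
    norm_num
    constructor
    · intro h; exact Or.inr (Or.inr ⟨h, e11.mp h11⟩)
    · rintro (⟨_, hd⟩ | ⟨_, hd⟩ | ⟨h, _⟩)
      · exact absurd (e3.mpr hd) (by omega)
      · exact absurd (e6.mpr hd) (by omega)
      · exact h
  · simp only [PySem.Dict.getD_insert]
    norm_num
    constructor
    · intro h; exact Or.inr (Or.inl ⟨h, e6.mp h6⟩)
    · rintro (⟨_, hd⟩ | ⟨h, _⟩ | ⟨_, hd⟩)
      · exact absurd (e3.mpr hd) (by omega)
      · exact h
      · exact absurd (e11.mpr hd) (by omega)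
  · simp only [PySem.Dict.getD_insert]
    norm_num
    constructor
    · intro h; exact Or.inl ⟨h, e3.mp h3⟩
    · rintro (⟨h, _⟩ | ⟨_, hd⟩ | ⟨_, hd⟩)
      · exact h
      · exact absurd (e6.mpr hd) (by omega)
      · exact absurd (e11.mpr hd) (by omega)
  · rw [PySem.Dict.get?_empty]
    simp only [Bool.false_eq_true, false_iff]
    rintro (⟨_, hd⟩ | ⟨_, hd⟩ | ⟨_, hd⟩)
    · exact absurd (e3.mpr hd) (by omega)
    · exact absurd (e6.mpr hd) (by omega)
    · exact absurd (e11.mpr hd) (by omega)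

theorem min_match_spec (xs : List Int) (m : Int) (h1 : m ∈ xs) (h2 : ∀ x ∈ xs, m ≤ x) :
    (match PySem.List.min? xs (fun x => x) with | some v => v | none => 0) = m := by
  cases xs with
  | nil => cases h1
  | cons x t =>
    have hred : (match PySem.List.min? (x :: t) (fun y => y) with | some v => v | none => 0)
        = t.foldl min x := by rw [PySem.List.min?_id_cons]
    rw [hred]
    have hle := PySem.List.foldl_min_le t x
    apply le_antisymm
    · rcases List.mem_cons.mp h1 with rfl | hm
      · exact hle.1
      · exact hle.2 _ hm
    · rcases PySem.List.foldl_min_mem t x with h | h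
      · rw [h]; exact h2 x List.mem_cons_self
      · exact h2 _ (List.mem_cons_of_mem _ h)

theorem find?_pyRange_aux (b v : Int) (p : Int → Bool) (n : Nat) :
    ∀ a : Int, a ≤ v → v < b → p v = true → (∀ d, a ≤ d → d < v → p d = false) →
      (v - a).toNat = n → (PySem.List.pyRange a b 1).find? p = some v := by
  induction n with
  | zero =>
    intro a h1 h2 hp hmin hn
    have hav : a = v := by omega
    subst hav
    rw [PySem.List.pyRange_one_cons (by omega)]
    simp [List.find?, hp]
  | succ n ih =>
    intro a h1 h2 hp hmin hn
    have hav : a < v := by omega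
    rw [PySem.List.pyRange_one_cons (by omega)]
    rw [List.find?_cons_of_neg (by simp [hmin a le_rfl hav])]
    exact ih (a + 1) (by omega) h2 hp (fun d hd1 hd2 => hmin d (by omega) hd2) (by omega)

theorem find?_pyRange_eq_some (a b v : Int) (p : Int → Bool) (h1 : a ≤ v) (h2 : v < b)
    (hp : p v = true) (hmin : ∀ d, a ≤ d → d < v → p d = false) :
    (PySem.List.pyRange a b 1).find? p = some v :=
  find?_pyRange_aux b v p (v - a).toNat a h1 h2 hp hmin rfl

-- both tails agree on the common minimum v
theorem both_eq_v (pm : Int) (L : List String) (v : Int)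
    (hmem : pvMS pm L v) (hmin : ∀ x, pvMS pm L x → v ≤ x) :
    (match PySem.List.min? (pvDelays pm L) (fun x => x) with | some m => m | none => 0)
    = (match (PySem.List.pyRange 1 13 1).find? (pvQ pm L) with | some d => d | none => 0) := by
  have hv := ms_bounds pm L v hmem
  have hB : (PySem.List.pyRange 1 13 1).find? (pvQ pm L) = some v := by
    apply find?_pyRange_eq_some 1 13 v _ hv.1 (by omega)
      ((q_iff pm L v hv.1 hv.2).mpr hmem)
    intro d hd1 hd2
    cases hpd : pvQ pm L d with
    | false => rfl
    | true =>
      exact absurd (hmin d ((q_iff pm L d hd1 (by omega)).mp hpd)) (by omega)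
  rw [hB]
  exact min_match_spec _ v ((mem_delays pm L v).mpr hmem)
    (fun x hx => hmin x ((mem_delays pm L x).mp hx))

theorem min_scan (pm : Int) (L : List String) :
    (match PySem.List.min? (pvDelays pm L) (fun x => x) with | some m => m | none => 0)
    = (match (PySem.List.pyRange 1 13 1).find? (pvQ pm L) with | some d => d | none => 0) := by
  by_cases hz : L.contains "ZAID" = true <;>
    by_cases hk : L.contains "KHARIF" = true <;>
    by_cases hr : L.contains "RABI" = true
  · -- z k r
    apply both_eq_v pm L (min (min (pvDz pm) (pvDk pm)) (pvDr pm))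
    · rcases min_choice (min (pvDz pm) (pvDk pm)) (pvDr pm) with h | h
      · rcases min_choice (pvDz pm) (pvDk pm) with h2 | h2
        · exact Or.inl ⟨hz, by rw [h, h2]⟩
        · exact Or.inr (Or.inl ⟨hk, by rw [h, h2]⟩)
      · exact Or.inr (Or.inr ⟨hr, by rw [h]⟩)
    · rintro x (⟨_, rfl⟩ | ⟨_, rfl⟩ | ⟨_, rfl⟩)
      · exact le_trans (min_le_left _ _) (min_le_left _ _)
      · exact le_trans (min_le_left _ _) (min_le_right _ _)
      · exact min_le_right _ _
  · -- z k
    apply both_eq_v pm L (min (pvDz pm) (pvDk pm))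
    · rcases min_choice (pvDz pm) (pvDk pm) with h | h
      · exact Or.inl ⟨hz, h⟩
      · exact Or.inr (Or.inl ⟨hk, h⟩)
    · rintro x (⟨_, rfl⟩ | ⟨_, rfl⟩ | ⟨hc, rfl⟩)
      · exact min_le_left _ _
      · exact min_le_right _ _
      · exact absurd hc hr
  · -- z r
    apply both_eq_v pm L (min (pvDz pm) (pvDr pm))
    · rcases min_choice (pvDz pm) (pvDr pm) with h | h
      · exact Or.inl ⟨hz, h⟩
      · exact Or.inr (Or.inr ⟨hr, h⟩)
    · rintro x (⟨_, rfl⟩ | ⟨hc, rfl⟩ | ⟨_, rfl⟩)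
      · exact min_le_left _ _
      · exact absurd hc hk
      · exact min_le_right _ _
  · -- z
    apply both_eq_v pm L (pvDz pm)
    · exact Or.inl ⟨hz, rfl⟩
    · rintro x (⟨_, rfl⟩ | ⟨hc, rfl⟩ | ⟨hc, rfl⟩)
      · exact le_rfl
      · exact absurd hc hk
      · exact absurd hc hr
  · -- k r
    apply both_eq_v pm L (min (pvDk pm) (pvDr pm))
    · rcases min_choice (pvDk pm) (pvDr pm) with h | h
      · exact Or.inr (Or.inl ⟨hk, h⟩)
      · exact Or.inr (Or.inr ⟨hr, h⟩)
    · rintro x (⟨hc, rfl⟩ | ⟨_, rfl⟩ | ⟨_, rfl⟩)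
      · exact absurd hc hz
      · exact min_le_left _ _
      · exact min_le_right _ _
  · -- k
    apply both_eq_v pm L (pvDk pm)
    · exact Or.inr (Or.inl ⟨hk, rfl⟩)
    · rintro x (⟨hc, rfl⟩ | ⟨_, rfl⟩ | ⟨hc, rfl⟩)
      · exact absurd hc hz
      · exact le_rfl
      · exact absurd hc hr
  · -- r
    apply both_eq_v pm L (pvDr pm)
    · exact Or.inr (Or.inr ⟨hr, rfl⟩)
    · rintro x (⟨hc, rfl⟩ | ⟨hc, rfl⟩ | ⟨_, rfl⟩)
      · exact absurd hc hz
      · exact absurd hc hk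
      · exact le_rfl
  · -- none
    have hnone : ∀ x, ¬ pvMS pm L x := by
      rintro x (⟨hc, _⟩ | ⟨hc, _⟩ | ⟨hc, _⟩)
      · exact hz hc
      · exact hk hc
      · exact hr hc
    have hA : pvDelays pm L = [] := by
      apply List.eq_nil_iff_forall_not_mem.mpr
      intro x hx
      exact hnone x ((mem_delays pm L x).mp hx)
    have hB : (PySem.List.pyRange 1 13 1).find? (pvQ pm L) = none := by
      apply List.find?_eq_none.mpr
      intro x hx
      rw [PySem.List.mem_pyRange_one] at hx
      intro hq
      exact hnone x ((q_iff pm L x hx.1 (by omega)).mp hq)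
    rw [hA, hB]
    rfl

-- guard equalities
theorem isEmpty_ofList (L : List String) : (PySem.Set.ofList L).isEmpty = L.isEmpty := by
  cases L with
  | nil => rfl
  | cons x xs => rw [PySem.Set.ofList_cons]; rfl

theorem inter_special (L : List String) :
    (!(PySem.Set.inter (PySem.Set.ofList L) ["ALL", "BOTH", "PERENNIAL"]).isEmpty)
      = L.any pvIsSpecial := by
  rw [Bool.eq_iff_iff]
  rw [Bool.not_eq_eq_eq_not, Bool.not_true, List.isEmpty_eq_false_iff_exists_mem]
  simp only [List.any_eq_true, PySem.Set.mem_inter, PySem.Set.mem_ofList]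
  constructor
  · rintro ⟨x, hx, hmem⟩
    refine ⟨x, hx, ?_⟩
    simp only [List.mem_cons, List.not_mem_nil, or_false] at hmem
    unfold pvIsSpecial
    rcases hmem with rfl | rfl | rfl <;> rfl
  · rintro ⟨x, hx, hsp⟩
    refine ⟨x, hx, ?_⟩
    unfold pvIsSpecial at hsp
    rcases Bool.or_eq_true_iff.mp hsp with h | h
    · rcases Bool.or_eq_true_iff.mp h with h' | h' <;> rw [eq_of_beq h'] <;> simp
    · rw [eq_of_beq h]; simp

theorem set_contains_eq (L : List String) (x : String) :
    PySem.Set.contains (PySem.Set.ofList L) x = L.contains x := by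
  rw [Bool.eq_iff_iff]
  rw [PySem.Set.contains_iff, PySem.Set.mem_ofList]
  exact ⟨List.elem_eq_true_of_mem, List.mem_of_elem_eq_true⟩

theorem months_6_10 (pm : Int) :
    (pm == 6 || pm == 7 || pm == 8 || pm == 9 || pm == 10) = (6 ≤ pm && pm ≤ 10) := by
  rw [Bool.eq_iff_iff]; simp; omega

theorem months_3_5 (pm : Int) :
    (pm == 3 || pm == 4 || pm == 5) = (3 ≤ pm && pm ≤ 5) := by
  rw [Bool.eq_iff_iff]; simp; omega

-- the two tails after the falsy guard agree
theorem tail_eq (pm : Int) (ss : String) :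
    (let supported := pvSupported ss
     if supported.isEmpty || !(PySem.Set.inter supported ["ALL", "BOTH", "PERENNIAL"]).isEmpty then (0:Int)
     else
      let current := if pm == 6 || pm == 7 || pm == 8 || pm == 9 || pm == 10 then "KHARIF" else "RABI"
      if PySem.Set.contains supported current ||
          (PySem.Set.contains supported "ZAID" && (pm == 3 || pm == 4 || pm == 5)) then 0
      else
        let delays := supported.foldl (fun acc season =>
          match pvStartMonth.get? season with
          | none => acc
          | some start_month =>
            let delay := PySem.Int.mod (start_month - pm) 12
            acc ++ [if delay > 0 then delay else 12]) []
        match PySem.List.min? delays (fun x => x) with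
        | some m => m
        | none => 0)
    = ((let st := (((PySem.Str.split? ss ",").getD []).foldl pvFlagStep
          (false, false, false, false, false))
       if !st.1 || st.2.1 then 0
       else if (if 6 ≤ pm && pm ≤ 10 then st.2.2.2.1 else st.2.2.2.2) ||
           (st.2.2.1 && (3 ≤ pm && pm ≤ 5)) then 0
       else
        let supported : PySem.Dict String Bool :=
          ((PySem.Dict.empty.insert "ZAID" st.2.2.1).insert "KHARIF" st.2.2.2.1).insert "RABI" st.2.2.2.2
        match (PySem.List.pyRange 1 13 1).find? (fun d =>
          match pvSeasonByStart.get? (PySem.Int.mod (pm + d - 1) 12 + 1) with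
          | none => false
          | some season => supported.getD season false) with
        | some d => d
        | none => 0 : Int)) := by
  simp only [flags_fold, Bool.false_or]
  set L := pvL ((PySem.Str.split? ss ",").getD []) with hLdef
  have hsup : pvSupported ss = PySem.Set.ofList L := by
    rw [hLdef]
    rfl
  rw [hsup]
  have hg1 : ((PySem.Set.ofList L).isEmpty ||
      !(PySem.Set.inter (PySem.Set.ofList L) ["ALL", "BOTH", "PERENNIAL"]).isEmpty)
      = (!(!L.isEmpty) || L.any pvIsSpecial) := by
    rw [isEmpty_ofList, inter_special, Bool.not_not]
  rw [hg1]
  apply ite_congr rfl (fun _ => rfl)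
  intro _
  have hg2 : (PySem.Set.contains (PySem.Set.ofList L)
        (if pm == 6 || pm == 7 || pm == 8 || pm == 9 || pm == 10 then "KHARIF" else "RABI") ||
      (PySem.Set.contains (PySem.Set.ofList L) "ZAID" && (pm == 3 || pm == 4 || pm == 5)))
      = ((if 6 ≤ pm && pm ≤ 10 then L.contains "KHARIF" else L.contains "RABI") ||
         (L.contains "ZAID" && (3 ≤ pm && pm ≤ 5))) := by
    rw [months_6_10, months_3_5, apply_ite (PySem.Set.contains (PySem.Set.ofList L)),
        set_contains_eq, set_contains_eq, set_contains_eq]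
  rw [hg2]
  apply ite_congr rfl (fun _ => rfl)
  intro _
  rw [delays_eq]
  simp only [List.nil_append]
  exact min_scan pm L

-- ===== VERDICT (by name: the statement is the Claim_ definition above) =====
theorem season_start_delay_months_py_spec : Claim_equal_season_start_delay_months_py := by
  intro pm ss _
  unfold Spec_season_start_delay_months_py season_start_delay_months_py season_start_delay_months_py_alt
  exact ite_congr rfl (fun _ => rfl) (fun _ => tail_eq _ _)
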